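-- pv_equiv track=rewrite | github.com/Lanch3ros/MiPrimerRepo | T14/T14.3 Lancheros Ayora José Luis.py | en_conj_2_veces_primo
-- ===== SOURCE A (Python) =====
-- def es_primo(num):
--     if num < 2:
--         return False
--     for posdiv in range(2, num // 2 + 1):
--         if num % posdiv == 0:
--             return False
--     return True
--
-- def cuenta_en_vector(v, tv, que):
--     cont = 0
--     for pv in range(tv):
--         if v[pv] == que:
--             cont += 1
--     return cont
--
-- def en_conj_2_veces_primo(conjunto_1, c_elem_1, conjunto_2, c_elem_2):
--     tercer_vector = []
--     contador_primos = 0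
--     for i in range(c_elem_1):
--         numero = conjunto_1[i]
--         cantidad = cuenta_en_vector(conjunto_2, c_elem_2, numero)
--         if es_primo(cantidad):
--             tercer_vector.append(numero)
--             contador_primos += 1
--
--     return tercer_vector, contador_primos
-- ===== SOURCE B (Python) =====
-- def _es_primo_raiz(num):
--     if num < 2:
--         return False
--     d = 2
--     while d * d <= num:
--         if num % d == 0:
--             return False
--         d += 1
--     return True
--
--
-- def en_conj_2_veces_primo(conjunto_1, c_elem_1, conjunto_2, c_elem_2):
--     conteos = {}
--     for x in conjunto_2[:max(c_elem_2, 0)]: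
--         conteos[x] = conteos.get(x, 0) + 1
--     tercer_vector = [x for x in conjunto_1[:max(c_elem_1, 0)]
--                      if _es_primo_raiz(conteos.get(x, 0))]
--     return tercer_vector, len(tercer_vector)
-- ===== Notes on version B (the rewrite author's own statement) =====
-- stated objective: faster
-- what changed: B replaces the per-element linear scan of conjunto_2 by a count dictionary built once over the considered prefix, and replaces the trial-division loop running to num // 2 by one that stops at the integer square root (d*d <= num).
import Mathlib
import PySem

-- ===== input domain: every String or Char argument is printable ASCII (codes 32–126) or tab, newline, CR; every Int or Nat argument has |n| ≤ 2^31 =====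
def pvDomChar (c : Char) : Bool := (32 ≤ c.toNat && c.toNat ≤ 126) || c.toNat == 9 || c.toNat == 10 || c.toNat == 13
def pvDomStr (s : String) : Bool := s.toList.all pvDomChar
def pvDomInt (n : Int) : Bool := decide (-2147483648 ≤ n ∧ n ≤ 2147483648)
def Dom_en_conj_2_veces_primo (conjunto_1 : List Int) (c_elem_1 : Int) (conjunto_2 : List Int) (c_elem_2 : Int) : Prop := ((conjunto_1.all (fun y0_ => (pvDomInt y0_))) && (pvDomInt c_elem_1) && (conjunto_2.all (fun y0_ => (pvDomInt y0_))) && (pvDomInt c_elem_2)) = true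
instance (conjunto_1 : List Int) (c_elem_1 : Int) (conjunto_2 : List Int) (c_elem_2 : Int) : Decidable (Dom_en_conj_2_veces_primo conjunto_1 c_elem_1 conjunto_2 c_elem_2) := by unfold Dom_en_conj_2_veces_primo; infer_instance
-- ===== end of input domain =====

-- B builds a count dictionary over conjunto_2 once instead of re-scanning conjunto_2 per element,
-- and its primality test stops at the square root instead of num // 2 (measured faster by the check).


-- ===== PORT A =====
-- trial division up to num // 2 (the loop's early 'return False' is modelled by List.all over the same range)
def es_primo (num : Int) : Bool :=
  if num < 2 then false
  else (PySem.List.pyRange 2 (PySem.Int.floordiv num 2 + 1)).all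
         (fun posdiv => !(PySem.Int.mod num posdiv == 0))

-- v[pv] is exact for 0 ≤ pv < len v, which Pre_ guarantees (pyGetD's default is never read there)
def cuenta_en_vector (v : List Int) (tv : Int) (que : Int) : Int :=
  (PySem.List.pyRange 0 tv).foldl
    (fun cont pv => if PySem.List.pyGetD v pv 0 == que then cont + 1 else cont) 0

def en_conj_2_veces_primo (conjunto_1 : List Int) (c_elem_1 : Int) (conjunto_2 : List Int) (c_elem_2 : Int) : List Int × Int :=
  (PySem.List.pyRange 0 c_elem_1).foldl
    (fun (st : List Int × Int) i =>
      let numero := PySem.List.pyGetD conjunto_1 i 0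
      let cantidad := cuenta_en_vector conjunto_2 c_elem_2 numero
      if es_primo cantidad then (st.1 ++ [numero], st.2 + 1) else st)
    ([], 0)

-- ===== PORT B =====
-- while d * d <= num: trial division stopping at the square root
def es_primo_raiz_go (num d : Int) : Bool :=
  if _h : d * d ≤ num then
    if PySem.Int.mod num d == 0 then false else es_primo_raiz_go num (d + 1)
  else true
termination_by (num + 1 - d).toNat
decreasing_by
  have h1 : d ≤ d * d := by rcases Int.le_total d 0 with h | h <;> nlinarith
  omega

def es_primo_raiz (num : Int) : Bool :=
  if num < 2 then false else es_primo_raiz_go num 2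

-- conteos[x] = conteos.get(x, 0) + 1 over conjunto_2[:c_elem_2], then one filtering pass
def en_conj_2_veces_primo_alt (conjunto_1 : List Int) (c_elem_1 : Int) (conjunto_2 : List Int) (c_elem_2 : Int) : List Int × Int :=
  let conteos := (PySem.List.slice conjunto_2 none (some (max c_elem_2 0))).foldl
      (fun d x => d.modify x 0 (fun c => c + 1)) (PySem.Dict.empty : PySem.Dict Int Int)
  let tercer_vector := (PySem.List.slice conjunto_1 none (some (max c_elem_1 0))).filter
      (fun x => es_primo_raiz (conteos.getD x 0))
  (tercer_vector, PySem.List.len tercer_vector)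

-- ===== PRECONDITION & SPEC =====
-- Pre_ excludes exactly the inputs on which A raises IndexError: c_elem_1 larger than conjunto_1's
-- length, or (when the main loop runs at all, i.e. c_elem_1 > 0) c_elem_2 larger than conjunto_2's length.
def Pre_en_conj_2_veces_primo (conjunto_1 : List Int) (c_elem_1 : Int) (conjunto_2 : List Int) (c_elem_2 : Int) : Prop :=
  c_elem_1 ≤ (conjunto_1.length : Int) ∧ (c_elem_1 ≤ 0 ∨ c_elem_2 ≤ (conjunto_2.length : Int))
instance (conjunto_1 : List Int) (c_elem_1 : Int) (conjunto_2 : List Int) (c_elem_2 : Int) : Decidable (Pre_en_conj_2_veces_primo conjunto_1 c_elem_1 conjunto_2 c_elem_2) := by unfold Pre_en_conj_2_veces_primo; infer_instance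

def pvWitness_en_conj_2_veces_primo : List Int × Int × List Int × Int := ([2, 3, 5], 3, [2, 2, 3, 5, 5, 5], 6)

def Spec_en_conj_2_veces_primo (conjunto_1 : List Int) (c_elem_1 : Int) (conjunto_2 : List Int) (c_elem_2 : Int) (out : List Int × Int) : Prop := out = en_conj_2_veces_primo_alt conjunto_1 c_elem_1 conjunto_2 c_elem_2
instance (conjunto_1 : List Int) (c_elem_1 : Int) (conjunto_2 : List Int) (c_elem_2 : Int) (out : List Int × Int) : Decidable (Spec_en_conj_2_veces_primo conjunto_1 c_elem_1 conjunto_2 c_elem_2 out) := by unfold Spec_en_conj_2_veces_primo; infer_instance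

-- ===== CLAIM (what is proved, stated in full; the proofs are below) =====
def Claim_equal_en_conj_2_veces_primo : Prop := ∀ (conjunto_1 : List Int) (c_elem_1 : Int) (conjunto_2 : List Int) (c_elem_2 : Int), Dom_en_conj_2_veces_primo conjunto_1 c_elem_1 conjunto_2 c_elem_2 → Pre_en_conj_2_veces_primo conjunto_1 c_elem_1 conjunto_2 c_elem_2 → Spec_en_conj_2_veces_primo conjunto_1 c_elem_1 conjunto_2 c_elem_2 (en_conj_2_veces_primo conjunto_1 c_elem_1 conjunto_2 c_elem_2)

-- ===== LEMMAS AND PROOFS =====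

-- the square-root loop, started at any d ≥ 1, looks for a divisor e with d ≤ e and e * e ≤ num
theorem es_primo_raiz_go_iff (num d : Int) (hd : 1 ≤ d) :
    es_primo_raiz_go num d = true ↔ ∀ e : Int, d ≤ e → e * e ≤ num → ¬ (e ∣ num) := by
  fun_induction es_primo_raiz_go num d with
  | case1 d h hmod =>
    simp only [Bool.false_eq_true, false_iff]
    intro hall
    exact hall d le_rfl h ((PySem.Int.mod_eq_zero_iff_dvd num d).mp (by simpa using hmod))
  | case2 d h hmod ih =>
    rw [ih (by omega)]
    constructor
    · intro hall e hde hee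
      rcases eq_or_lt_of_le hde with rfl | hlt
      · intro hdvd
        exact absurd ((PySem.Int.mod_eq_zero_iff_dvd num d).mpr hdvd) (by simpa using hmod)
      · exact hall e (by omega) hee
    · intro hall e hde hee
      exact hall e (by omega) hee
  | case3 d h =>
    simp only [true_iff]
    intro e hde hee hdvd
    have : d * d ≤ e * e := by nlinarith
    omega

-- A's loop over range(2, num // 2 + 1) looks for a divisor p with 2 ≤ p ≤ num // 2
theorem es_primo_iff (num : Int) (h2 : 2 ≤ num) :
    es_primo num = true ↔ ∀ p : Int, 2 ≤ p → p ≤ PySem.Int.floordiv num 2 → ¬ (p ∣ num) := by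
  rw [es_primo, if_neg (by omega), List.all_eq_true]
  constructor
  · intro hall p h2p hple hdvd
    have hmem : p ∈ PySem.List.pyRange 2 (PySem.Int.floordiv num 2 + 1) :=
      PySem.List.mem_pyRange_one.mpr ⟨h2p, by omega⟩
    have hne := hall p hmem
    simp only [Bool.not_eq_true'] at hne
    rw [(PySem.Int.mod_eq_zero_iff_dvd num p).mpr hdvd] at hne
    simp at hne
  · intro hall p hmem
    obtain ⟨h2p, hlt⟩ := PySem.List.mem_pyRange_one.mp hmem
    simp only [Bool.not_eq_true', beq_eq_false_iff_ne, ne_eq]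
    intro h0
    exact hall p h2p (by omega) ((PySem.Int.mod_eq_zero_iff_dvd num p).mp h0)

-- the two divisor searches succeed on exactly the same numbers
theorem divisor_bounds_iff (num : Int) (h2 : 2 ≤ num) :
    (∀ p : Int, 2 ≤ p → p ≤ PySem.Int.floordiv num 2 → ¬ (p ∣ num)) ↔
      (∀ e : Int, 2 ≤ e → e * e ≤ num → ¬ (e ∣ num)) := by
  constructor
  · intro hp e h2e hee hdvd
    have h2e2 : e * 2 ≤ num := by nlinarith
    exact hp e h2e ((PySem.Int.le_floordiv_iff_mul_le (by omega)).mpr h2e2) hdvd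
  · intro he p h2p hple hdvd
    have h2p2 : p * 2 ≤ num := (PySem.Int.le_floordiv_iff_mul_le (by omega)).mp hple
    obtain ⟨q, hq⟩ := hdvd
    by_cases hpp : p * p ≤ num
    · exact he p h2p hpp ⟨q, hq⟩
    · push Not at hpp
      have hq2 : 2 ≤ q := by nlinarith
      have hqp : q < p := by nlinarith
      have hqq : q * q ≤ num := by nlinarith
      exact he q hq2 hqq ⟨p, by rw [hq]; ring⟩

-- the two primality tests agree on every integer
theorem es_primo_eq_raiz (num : Int) : es_primo num = es_primo_raiz num := by
  by_cases h2 : num < 2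
  · simp [es_primo, es_primo_raiz, h2]
  · push Not at h2
    rw [es_primo_raiz, if_neg (by omega)]
    exact Bool.coe_iff_coe.mp
      ((es_primo_iff num h2).trans
        ((divisor_bounds_iff num h2).trans (es_primo_raiz_go_iff num 2 (by omega)).symm))

-- an index loop over range(0, n) reading xs[j] is a fold over the prefix xs[:n]
theorem foldl_pyRange_take {α β : Type} (xs : List α) (d : α) (f : β → α → β) (init : β)
    (n : Int) (h0 : 0 ≤ n) (h1 : n ≤ (xs.length : Int)) :
    (PySem.List.pyRange 0 n).foldl (fun acc j => f acc (PySem.List.pyGetD xs j d)) init =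
      (xs.take n.toNat).foldl f init := by
  have hlen : ((xs.take n.toNat).length : Int) = n := by simp; omega
  have hcongr : (PySem.List.pyRange 0 n).foldl
      (fun acc j => f acc (PySem.List.pyGetD xs j d)) init =
      (PySem.List.pyRange 0 n).foldl
      (fun acc j => f acc (PySem.List.pyGetD (xs.take n.toNat) j d)) init := by
    apply PySem.List.foldl_congr_mem
    intro acc j hj
    obtain ⟨hj0, hjn⟩ := PySem.List.mem_pyRange_one.mp hj
    rw [PySem.List.pyGetD_eq_getElem xs d hj0 (by omega),
        PySem.List.pyGetD_eq_getElem (xs.take n.toNat) d hj0 (by omega)]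
    congr 1
    exact (List.getElem_take).symm
  rw [hcongr]
  have := PySem.List.foldl_pyRange_pyGetD (xs.take n.toNat) d f init (a := 0) le_rfl
  rw [show PySem.List.len (xs.take n.toNat) = n from hlen] at this
  simpa using this

theorem cuenta_eq_count (v : List Int) (tv que : Int) (h1 : tv ≤ (v.length : Int)) :
    cuenta_en_vector v tv que = ((v.take tv.toNat).count que : Int) := by
  rcases Int.le_total tv 0 with h | h
  · rw [cuenta_en_vector, PySem.List.pyRange_one]
    have h0' : (tv - 0).toNat = 0 := by omega
    have h0'' : tv.toNat = 0 := by omega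
    simp [h0'']
  · rw [cuenta_en_vector,
        foldl_pyRange_take v 0 (fun cont x => if x == que then cont + 1 else cont) 0 tv
          (by omega) h1,
        PySem.List.foldl_count_if, List.count_eq_countP]
    simp

-- A's accumulating pair loop is (filter, its length)
theorem pairfold (p : Int → Bool) (l : List Int) :
    l.foldl (fun (st : List Int × Int) x => if p x then (st.1 ++ [x], st.2 + 1) else st) ([], 0)
      = (l.filter p, ((l.filter p).length : Int)) := by
  have hstep : (fun (st : List Int × Int) x => if p x then (st.1 ++ [x], st.2 + 1) else st)
      = (fun st x => (if p x then st.1 ++ [x] else st.1, if p x then st.2 + 1 else st.2)) := by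
    funext st x; by_cases h : p x <;> simp [h]
  rw [hstep,
      PySem.List.foldl_prod_mk (fun s (e : Int) => if p e then s ++ [e] else s)
        (fun s (e : Int) => if p e then s + 1 else s) l [] 0,
      PySem.List.foldl_count_if p l 0]
  have happ := PySem.List.foldl_append_if p id l []
  simp only [id_eq] at happ
  rw [happ]
  simp [List.countP_eq_length_filter]

theorem ports_eq (c1 : List Int) (n1 : Int) (c2 : List Int) (n2 : Int)
    (h1l : n1 ≤ (c1.length : Int)) (hor : n1 ≤ 0 ∨ n2 ≤ (c2.length : Int)) :
    en_conj_2_veces_primo c1 n1 c2 n2 = en_conj_2_veces_primo_alt c1 n1 c2 n2 := by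
  by_cases hn1 : n1 ≤ 0
  · have hA : en_conj_2_veces_primo c1 n1 c2 n2 = ([], 0) := by
      rw [en_conj_2_veces_primo, PySem.List.pyRange_one]
      have h0' : n1.toNat = 0 := by omega
      simp [h0']
    have hmax : max n1 0 = 0 := by omega
    rw [hA, en_conj_2_veces_primo_alt]
    simp only [hmax, PySem.List.slice_to _ le_rfl]
    simp [PySem.List.len]
  · have h10 : 0 ≤ n1 := by omega
    have h2l : n2 ≤ (c2.length : Int) := hor.resolve_left hn1
    have hmax1 : (max n1 0).toNat = n1.toNat := by omega
    have hmax2 : (max n2 0).toNat = n2.toNat := by omega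
    have hdict : ∀ x : Int,
        ((c2.take n2.toNat).foldl (fun d x => d.modify x 0 (fun c => c + 1))
          (PySem.Dict.empty : PySem.Dict Int Int)).getD x 0 = (((c2.take n2.toNat).count x : Int)) := by
      intro x
      rw [PySem.Dict.getD_foldl_modify_add_one, PySem.Dict.getD_empty]
      ring
    have hA : en_conj_2_veces_primo c1 n1 c2 n2 =
        (c1.take n1.toNat).foldl (fun (st : List Int × Int) numero =>
          if es_primo (cuenta_en_vector c2 n2 numero) then (st.1 ++ [numero], st.2 + 1) else st)
          ([], 0) :=
      foldl_pyRange_take c1 0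
        (fun (st : List Int × Int) numero =>
          if es_primo (cuenta_en_vector c2 n2 numero) then (st.1 ++ [numero], st.2 + 1) else st)
        ([], 0) n1 h10 h1l
    have hpred : ∀ x : Int, es_primo (cuenta_en_vector c2 n2 x)
        = es_primo_raiz (((c2.take n2.toNat).count x : Int)) := by
      intro x; rw [cuenta_eq_count c2 n2 x h2l, es_primo_eq_raiz]
    have hAB : en_conj_2_veces_primo c1 n1 c2 n2 =
        ((c1.take n1.toNat).filter (fun x => es_primo_raiz (((c2.take n2.toNat).count x : Int))),
          (((c1.take n1.toNat).filter (fun x => es_primo_raiz (((c2.take n2.toNat).count x : Int)))).length : Int)) := by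
      rw [hA]
      rw [PySem.List.foldl_congr_mem _ _
        (fun (st : List Int × Int) x =>
          if es_primo_raiz (((c2.take n2.toNat).count x : Int)) then (st.1 ++ [x], st.2 + 1) else st) _
        (by intro acc x _; rw [hpred])]
      exact pairfold _ _
    rw [hAB, en_conj_2_veces_primo_alt]
    simp only [PySem.List.slice_to _ (le_max_right n1 0), PySem.List.slice_to _ (le_max_right n2 0),
      hmax1, hmax2]
    have hfil : (fun x => es_primo_raiz
          (((c2.take n2.toNat).foldl (fun d x => d.modify x 0 (fun c => c + 1))
            (PySem.Dict.empty : PySem.Dict Int Int)).getD x 0))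
        = (fun x : Int => es_primo_raiz (((c2.take n2.toNat).count x : Int))) := by
      funext x; rw [hdict]
    rw [hfil]
    simp [PySem.List.len]

-- ===== VERDICT (by name: the statement is the Claim_ definition above) =====
theorem en_conj_2_veces_primo_spec : Claim_equal_en_conj_2_veces_primo := by
  intro c1 n1 c2 n2 _hdom hpre
  obtain ⟨h1l, hor⟩ := hpre
  exact ports_eq c1 n1 c2 n2 h1l hor
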